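-- pv_equiv track=rewrite | github.com/KateK17676/Python | Lab1/logic.py | from_sym_ternary
-- ===== SOURCE A (Python) =====
-- def from_sym_ternary(number):
--     """
--     Функция преобразует строку с числом из
--     троичной симметричной системы счисления в десятичную
--     Принимает: number: str()
--     Возвращает: decimal: int() в десятичной системе
--     """
--     decimal = 0
--     for digit in number:
--         if digit == '+':
--             decimal = decimal * 3 + 1
--         if digit == '-':
--             decimal = decimal * 3 - 1
--         if digit == '0':
--             decimal = decimal * 3
--     return decimal
-- ===== SOURCE B (Python) =====
-- def from_sym_ternary(number):
--     total = 0
--     p = 1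
--     for digit in reversed(number):
--         if digit == '+':
--             total += p
--             p *= 3
--         elif digit == '-':
--             total -= p
--             p *= 3
--         elif digit == '0':
--             p *= 3
--     return total
-- ===== Notes on version B (the rewrite author's own statement) =====
-- stated objective: alternative
-- what changed: Replaces left-to-right Horner accumulation (decimal = decimal*3 + digit) with a right-to-left positional-weight scan maintaining a power-of-three accumulator that advances only on recognized digits.
import Mathlib
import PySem

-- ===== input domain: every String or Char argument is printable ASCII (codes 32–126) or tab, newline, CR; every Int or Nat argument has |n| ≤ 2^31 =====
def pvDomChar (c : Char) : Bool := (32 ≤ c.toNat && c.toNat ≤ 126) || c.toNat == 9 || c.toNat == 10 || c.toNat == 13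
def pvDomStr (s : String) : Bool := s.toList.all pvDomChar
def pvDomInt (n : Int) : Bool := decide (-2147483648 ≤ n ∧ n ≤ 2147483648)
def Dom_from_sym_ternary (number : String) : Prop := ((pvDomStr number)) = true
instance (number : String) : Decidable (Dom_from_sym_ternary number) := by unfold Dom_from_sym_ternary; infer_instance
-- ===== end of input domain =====

-- B replaces A's left-to-right Horner accumulation with a right-to-left positional-weight scan (alternative decomposition, same cost).


-- ===== PORT A =====
-- A's loop body: three independent `if`s in sequence, Horner-style accumulation.
def pvStepA (d : Int) (c : Char) : Int :=
  let d1 := if c = '+' then d * 3 + 1 else d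
  let d2 := if c = '-' then d1 * 3 - 1 else d1
  if c = '0' then d2 * 3 else d2

def from_sym_ternary (number : String) : Int :=
  number.toList.foldl pvStepA 0

-- ===== PORT B =====
-- B's loop body: right-to-left scan with (total, power) state; power advances only on recognized digits.
def pvStepB (s : Int × Int) (c : Char) : Int × Int :=
  if c = '+' then (s.1 + s.2, s.2 * 3)
  else if c = '-' then (s.1 - s.2, s.2 * 3)
  else if c = '0' then (s.1, s.2 * 3)
  else s

def from_sym_ternary_alt (number : String) : Int :=
  (number.toList.reverse.foldl pvStepB (0, 1)).1

-- ===== PRECONDITION & SPEC =====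
def Spec_from_sym_ternary (number : String) (out : Int) : Prop := out = from_sym_ternary_alt number
instance (number : String) (out : Int) : Decidable (Spec_from_sym_ternary number out) := by unfold Spec_from_sym_ternary; infer_instance

-- ===== CLAIM (what is proved, stated in full; the proofs are below) =====
def Claim_equal_from_sym_ternary : Prop := ∀ (number : String), Dom_from_sym_ternary number → Spec_from_sym_ternary number (from_sym_ternary number)

-- ===== LEMMAS AND PROOFS =====

-- count of recognized digits
def pvCnt (l : List Char) : Nat := (l.filter (fun c => c = '+' ∨ c = '-' ∨ c = '0')).length

lemma pvA_shift (l : List Char) : ∀ d : Int,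
    l.foldl pvStepA d = l.foldl pvStepA 0 + d * 3 ^ pvCnt l := by
  induction l with
  | nil => intro d; simp [pvCnt]
  | cons c l ih =>
    intro d
    simp only [List.foldl_cons]
    rw [ih (pvStepA d c), ih (pvStepA 0 c)]
    by_cases h1 : c = '+'
    · simp only [pvStepA, pvCnt, h1]
      simp [pow_succ]
      ring
    · by_cases h2 : c = '-'
      · simp only [pvStepA, pvCnt, h2]
        simp [h1, h2, pow_succ]
        ring
      · by_cases h3 : c = '0'
        · simp only [pvStepA, pvCnt, h3]
          simp [h1, h2, h3, pow_succ]
          ring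
        · simp [pvStepA, pvCnt, h1, h2, h3]

lemma pvB_inv (l : List Char) :
    l.reverse.foldl pvStepB (0, 1) = (l.foldl pvStepA 0, 3 ^ pvCnt l) := by
  induction l with
  | nil => simp [pvCnt]
  | cons c l ih =>
    simp only [List.reverse_cons, List.foldl_append, List.foldl_cons, List.foldl_nil, ih]
    have hA : List.foldl pvStepA (pvStepA 0 c) l
        = List.foldl pvStepA 0 l + pvStepA 0 c * 3 ^ pvCnt l := pvA_shift l (pvStepA 0 c)
    simp only [hA]
    by_cases h1 : c = '+'
    · simp only [pvStepB, pvStepA, pvCnt, h1]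
      simp [pow_succ]
      all_goals (constructor <;> ring)
    · by_cases h2 : c = '-'
      · simp only [pvStepB, pvStepA, pvCnt, h2]
        simp [h1, pow_succ]
        all_goals (constructor <;> ring)
      · by_cases h3 : c = '0'
        · simp only [pvStepB, pvStepA, pvCnt, h3]
          simp [h1, h2, pow_succ]
          all_goals (constructor <;> ring)
        · simp [pvStepB, pvStepA, pvCnt, h1, h2, h3]

-- ===== VERDICT (by name: the statement is the Claim_ definition above) =====
theorem from_sym_ternary_spec : Claim_equal_from_sym_ternary := by
  intro number _
  unfold Spec_from_sym_ternary from_sym_ternary from_sym_ternary_alt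
  rw [pvB_inv]
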